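-- pv_equiv track=rewrite | github.com/godsboy404/helloworld | helloworld/por1.py | get_pictures_urls
-- ===== SOURCE A (Python) =====
-- def get_pictures_urls(text):
--     st='img src="'
--     m=len(st)
--     i=0
--     n=len(text)
--     urls=[]#储存url
--     while i<n:
--         if text[i:i+m]==st:
--             url=''
--             for j in range(i+m,n):
--                 if text[j]=='"':
--                     i=j
--                     urls.append(url)
--                     break
--                 url+=text[j]
--         i+=1
--     return urls
-- ===== SOURCE B (Python) =====
-- import re
--
-- def get_pictures_urls(text):
--     return re.findall(r'img src="([^"]*)"', text)
-- ===== Notes on version B (the rewrite author's own statement) =====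
-- stated objective: idiomatic
-- what changed: Replaces A's hand-written while-loop character scan (a prefix slice comparison at every index plus an inner character-accumulating loop) with a single re.findall call whose pattern matches the literal prefix, captures the maximal run of non-quote characters and requires the closing quote.
import Mathlib
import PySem

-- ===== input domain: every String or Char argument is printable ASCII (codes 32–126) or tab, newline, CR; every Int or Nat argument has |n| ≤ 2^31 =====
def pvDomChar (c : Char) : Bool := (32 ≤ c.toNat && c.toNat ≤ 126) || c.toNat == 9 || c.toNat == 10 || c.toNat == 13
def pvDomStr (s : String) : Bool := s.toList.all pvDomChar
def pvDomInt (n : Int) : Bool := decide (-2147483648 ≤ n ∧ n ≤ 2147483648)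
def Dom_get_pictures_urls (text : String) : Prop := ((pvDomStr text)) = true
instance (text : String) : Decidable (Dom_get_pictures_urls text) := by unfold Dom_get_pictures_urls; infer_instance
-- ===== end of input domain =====

-- B replaces A's hand-rolled per-character scanning loop by the single regex call
-- re.findall(r'img src="([^"]*)"', text) — more idiomatic; return values are identical.


-- ===== PORT A =====

-- st = 'img src="' as a list of characters (Python strings are ported via List Char)
def pvPat : List Char := "img src=\"".toList

-- A's inner `for j in range(i+m, n)`, with fuel = n - j, the number of iterations the
-- range still has (a pure totality guard): returns `some (j, url)` when the loop breaks
-- at the quote at index j (having accumulated url), `none` when it runs off the end.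
def pvAInner (cs : List Char) : Nat → Nat → List Char → Option (Nat × List Char)
  | 0, _, _ => none
  | fuel+1, j, url =>
    -- text[j]: always in range here since 0 ≤ j < n = len(text), so getD is exact
    if cs.getD j ' ' = '"' then some (j, url)
    else pvAInner cs fuel (j+1) (url ++ [cs.getD j ' '])

-- A's outer `while i < n` loop; urls accumulates the appended results in order.
-- fuel is a pure totality guard (i strictly increases every iteration, so fuel = n - i
-- at the start suffices; the `i < n` test is Python's loop condition, kept verbatim).
def pvALoop (cs : List Char) (n : Nat) : Nat → Nat → List (List Char) → List (List Char)
  | 0, _, urls => urls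
  | fuel+1, i, urls =>
    if i < n then
      if (cs.drop i).take 9 = pvPat then    -- text[i:i+m] == st (0 ≤ i, so slice = drop/take)
        match pvAInner cs (n - (i+9)) (i+9) [] with
        | some (j, url) => pvALoop cs n fuel (j+1) (urls ++ [url])  -- break: i=j, append; then i+=1
        | none => pvALoop cs n fuel (i+1) urls                      -- no break: url discarded; i+=1
      else pvALoop cs n fuel (i+1) urls
    else urls

def get_pictures_urls (text : String) : List String :=
  ((pvALoop text.toList text.toList.length text.toList.length 0 []).map fun l => String.ofList l)

-- ===== PORT B =====

-- Hand-port of re.findall(r'img src="([^"]*)"', text): scan left to right; at each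
-- position try to match the literal prefix 'img src="', then the maximal run of
-- non-quote characters, then a literal '"'; on success capture the run and resume
-- right after the closing quote; on failure advance one position. This is exactly
-- re.findall's leftmost, non-overlapping matching semantics for this fixed pattern.
-- fuel (initially the string length, an upper bound on the scan steps) is a pure
-- totality guard.
def pvBGo : Nat → List Char → List String
  | 0, _ => []
  | fuel+1, cs =>
    if cs.take 9 = pvPat then
      let rest := cs.drop 9
      let url := rest.takeWhile (· ≠ '"')
      if url.length < rest.length then        -- a closing quote exists
        String.ofList url :: pvBGo fuel (rest.drop (url.length + 1))
      else []                                  -- no closing quote: no further match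
    else
      match cs with
      | [] => []
      | _ :: t => pvBGo fuel t

def get_pictures_urls_alt (text : String) : List String := pvBGo text.toList.length text.toList

-- ===== PRECONDITION & SPEC =====
def Spec_get_pictures_urls (text : String) (out : List String) : Prop := out = get_pictures_urls_alt text
instance (text : String) (out : List String) : Decidable (Spec_get_pictures_urls text out) := by unfold Spec_get_pictures_urls; infer_instance

-- ===== CLAIM (what is proved, stated in full; the proofs are below) =====
def Claim_equal_get_pictures_urls : Prop := ∀ (text : String), Dom_get_pictures_urls text → Spec_get_pictures_urls text (get_pictures_urls text)

-- ===== LEMMAS AND PROOFS =====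

-- the inner loop characterised via takeWhile
theorem pvAInner_spec (cs : List Char) (fuel : Nat) :
    ∀ j url, fuel = cs.length - j →
    pvAInner cs fuel j url =
      (let r := cs.drop j
       let u := r.takeWhile (· ≠ '"')
       if u.length < r.length then some (j + u.length, url ++ u) else none) := by
  induction fuel with
  | zero =>
      intro j url hf
      rw [List.drop_eq_nil_of_le (by omega)]
      simp [pvAInner]
  | succ fuel ih =>
      intro j url hf
      have hj : j < cs.length := by omega
      have hg : cs[j]?.getD ' ' = cs[j]'hj := by simp [List.getElem?_eq_getElem hj]
      rw [pvAInner, List.drop_eq_getElem_cons hj]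
      by_cases hc : cs[j]'hj = '"'
      · simp [List.getD, hg, hc]
      · simp only [List.getD, hg, hc, if_false]
        rw [ih (j+1) (url ++ [cs[j]'hj]) (by omega)]
        simp only [List.takeWhile_cons, hc, ne_eq, not_false_eq_true, decide_true,
          List.length_cons]
        split_ifs with h1 h2 h2 <;> simp_all <;> omega

-- the pattern cannot occur in 'mg src="' ++ r when r contains no quote
theorem pvNoOcc (r : List Char) (hr : '"' ∉ r) :
    ∀ u v : List Char, ('m'::'g'::' '::'s'::'r'::'c'::'='::'"'::r) ≠ u ++ pvPat ++ v := by
  intro u v h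
  match u with
  | [] => simp [pvPat] at h
  | [_] => simp [pvPat] at h
  | [_,_] => simp [pvPat] at h
  | [_,_,_] => simp [pvPat] at h
  | [_,_,_,_] => simp [pvPat] at h
  | [_,_,_,_,_] => simp [pvPat] at h
  | [_,_,_,_,_,_] => simp [pvPat] at h
  | [_,_,_,_,_,_,_] => simp [pvPat] at h
  | a::b::c::d::e::f::g::hh::u' =>
      simp [pvPat] at h
      exact hr (by rw [h.2.2.2.2.2.2.2.2]; simp)

theorem pvBGo_empty (fuel : Nat) : pvBGo fuel [] = [] := by
  cases fuel with
  | zero => rfl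
  | succ fuel => rfl

theorem pvBGo_cons_ne (fuel : Nat) (c : Char) (t : List Char)
    (h : (c::t).take 9 ≠ pvPat) : pvBGo (fuel+1) (c::t) = pvBGo fuel t := by
  conv_lhs => rw [pvBGo, if_neg h]

theorem pvBGo_match (fuel : Nat) (cs : List Char) (h : cs.take 9 = pvPat) :
    pvBGo (fuel+1) cs =
      (if ((cs.drop 9).takeWhile (· ≠ '"')).length < (cs.drop 9).length then
        String.ofList ((cs.drop 9).takeWhile (· ≠ '"')) ::
          pvBGo fuel ((cs.drop 9).drop (((cs.drop 9).takeWhile (· ≠ '"')).length + 1))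
      else []) := by
  obtain ⟨c, t, rfl⟩ : ∃ c t, cs = c :: t := by
    cases cs with
    | nil => simp [pvPat] at h
    | cons c t => exact ⟨c, t, rfl⟩
  conv_lhs => rw [pvBGo, if_pos h]

-- the result does not depend on the fuel, as long as it is at least the string length
theorem pvBGo_fuel (f1 : Nat) : ∀ (f2 : Nat) (t : List Char),
    t.length ≤ f1 → t.length ≤ f2 → pvBGo f1 t = pvBGo f2 t := by
  induction f1 with
  | zero =>
      intro f2 t h1 _
      have : t = [] := by cases t <;> simp_all
      rw [this, pvBGo_empty, pvBGo_empty]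
  | succ f1 ih =>
      intro f2 t h1 h2
      match t, f2 with
      | [], f2 => rw [pvBGo_empty, pvBGo_empty]
      | c :: t', 0 => exact absurd h2 (by simp)
      | c :: t', f2+1 =>
          by_cases hp : (c::t').take 9 = pvPat
          · rw [pvBGo_match f1 _ hp, pvBGo_match f2 _ hp]
            have hlen : (((c::t').drop 9).drop ((((c::t').drop 9).takeWhile (· ≠ '"')).length + 1)).length
                ≤ (c::t').length - 10 := by
              simp; omega
            split_ifs
            · have := ih f2
                (((c::t').drop 9).drop ((((c::t').drop 9).takeWhile (· ≠ '"')).length + 1))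
                (by simp_all; omega) (by simp_all; omega)
              rw [this]
            · rfl
          · rw [pvBGo_cons_ne f1 c t' hp, pvBGo_cons_ne f2 c t' hp]
            exact ih _ _ (by simp_all) (by simp_all)

-- if the pattern occurs nowhere in t, B produces nothing on t
theorem pvBGo_nil (fuel : Nat) : ∀ t : List Char, t.length ≤ fuel →
    (∀ u v : List Char, t ≠ u ++ pvPat ++ v) → pvBGo fuel t = [] := by
  induction fuel with
  | zero =>
      intro t h1 _
      have : t = [] := by cases t <;> simp_all
      rw [this]; rfl
  | succ fuel ih =>
      intro t h1 h
      by_cases h9 : t.take 9 = pvPat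
      · have ht : t = [] ++ pvPat ++ t.drop 9 := by
          rw [List.nil_append, ← h9, List.take_append_drop]
        exact absurd ht (h [] _)
      · match t with
        | [] => exact pvBGo_empty _
        | c :: t' =>
            rw [pvBGo_cons_ne fuel c t' h9]
            exact ih t' (by simp_all) (fun u v hv => h (c::u) v (by simp [hv]))

-- main loop invariant: A's loop from position i produces exactly B's matches on the suffix
theorem pvMain (cs : List Char) (fuel : Nat) : ∀ (i : Nat) (urls : List (List Char)),
    cs.length - i ≤ fuel →
    (pvALoop cs cs.length fuel i urls).map (fun l => String.ofList l) =
      urls.map (fun l => String.ofList l) ++ pvBGo (cs.drop i).length (cs.drop i) := by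
  induction fuel with
  | zero =>
      intro i urls hf
      rw [List.drop_eq_nil_of_le (by omega), pvBGo_empty]
      simp [pvALoop]
  | succ fuel ih =>
      intro i urls hf
      rw [pvALoop]
      by_cases hi : i < cs.length
      · rw [if_pos hi]
        obtain ⟨k, hk⟩ : ∃ k, (cs.drop i).length = k+1 :=
          ⟨(cs.drop i).length - 1, by simp; omega⟩
        have hk' : k = cs.length - (i+1) := by simp at hk; omega
        by_cases hp : (cs.drop i).take 9 = pvPat
        · have h9 : 9 ≤ cs.length - i := by
            have := congrArg List.length hp
            simp [pvPat] at this; omega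
          have hsplit : cs.drop i = pvPat ++ cs.drop (i+9) := by
            conv_lhs => rw [← List.take_append_drop 9 (cs.drop i)]
            rw [hp, List.drop_drop]
          have hrest : (cs.drop i).drop 9 = cs.drop (i+9) := by
            rw [List.drop_drop]
          rw [if_pos hp]
          rw [pvAInner_spec cs (cs.length - (i+9)) (i+9) [] rfl]
          by_cases hq : ((cs.drop (i+9)).takeWhile (· ≠ '"')).length < (cs.drop (i+9)).length
          · rw [if_pos hq]
            have hql : ((cs.drop (i+9)).takeWhile (· ≠ '"')).length ≤ cs.length - (i+9) := by
              simp at hq ⊢; omega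
            simp only []
            rw [ih (i+9+((cs.drop (i+9)).takeWhile (· ≠ '"')).length + 1)
                  (urls ++ [[] ++ (cs.drop (i+9)).takeWhile (· ≠ '"')]) (by omega)]
            rw [hk, pvBGo_match k _ hp, hrest, if_pos hq]
            have hdd : (cs.drop (i+9)).drop (((cs.drop (i+9)).takeWhile (· ≠ '"')).length+1)
                = cs.drop (i+9+((cs.drop (i+9)).takeWhile (· ≠ '"')).length+1) := by
              rw [List.drop_drop]; congr 1
            rw [hdd]
            simp only [List.map_append, List.map_cons, List.map_nil, List.nil_append,
              List.append_assoc, List.singleton_append]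
            congr 2
            exact pvBGo_fuel _ _ _ (le_refl _) (by simp; omega)
          · rw [if_neg hq]
            simp only []
            rw [ih (i+1) urls (by omega)]
            have hu : (cs.drop (i+9)).takeWhile (· ≠ '"') = cs.drop (i+9) := by
              have hpre := List.takeWhile_prefix (l := cs.drop (i+9)) (p := (· ≠ '"'))
              refine hpre.eq_of_length ?_
              have := hpre.length_le
              omega
            have hr : '"' ∉ cs.drop (i+9) := by
              intro hm
              rw [← hu] at hm
              have := List.mem_takeWhile_imp hm
              simp at this
            have htail : cs.drop (i+1) = 'm'::'g'::' '::'s'::'r'::'c'::'='::'"'::(cs.drop (i+9)) := by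
              have h1 : cs.drop (i+1) = (cs.drop i).drop 1 := by rw [List.drop_drop]
              rw [h1, hsplit]
              simp [pvPat]
            rw [hk, pvBGo_match k _ hp, hrest, if_neg hq]
            rw [htail, pvBGo_nil _ _ (by simp) (pvNoOcc _ hr)]
        · rw [if_neg hp]
          rw [ih (i+1) urls (by omega)]
          obtain ⟨c, t, hct⟩ : ∃ c t, cs.drop i = c :: t := by
            rcases h : cs.drop i with _ | ⟨c, t⟩
            · exact absurd (congrArg List.length h) (by simp; omega)
            · exact ⟨c, t, rfl⟩
          have ht : t = cs.drop (i+1) := by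
            have h1 : cs.drop (i+1) = (cs.drop i).drop 1 := by rw [List.drop_drop]
            rw [h1, hct]; simp
          rw [hct, List.length_cons, pvBGo_cons_ne _ c t (by rw [← hct]; exact hp), ht]
      · rw [if_neg hi]
        rw [List.drop_eq_nil_of_le (by omega), pvBGo_empty]
        simp

-- ===== VERDICT (by name: the statement is the Claim_ definition above) =====
theorem get_pictures_urls_spec : Claim_equal_get_pictures_urls := by
  intro text _
  unfold Spec_get_pictures_urls get_pictures_urls get_pictures_urls_alt
  simpa using pvMain text.toList text.toList.length 0 [] (by omega)
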